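-- pv_equiv track=rewrite | github.com/Tiezhengyuan/algorithm_python | basic/iterate_list2.py | traverse
-- ===== SOURCE A (Python) =====
-- def traverse(input:list, start:tuple, visited:list[tuple]):
--     '''
--     Given a start *, clockwise walk through all points
--     0 0 0
--     0 * 0
--     0 0 0
--     args: start tuple is (row index, col index)
--     '''
--     nrow, ncol = len(input), len(input[0])
--     # four possible directions
--     for move in [(-1,0), (0,1), (1,0), (0,-1)]:
--         next_row = start[0] + move[0]
--         next_col = start[1] + move[1]
--         if 0 <= next_row < nrow and 0 <= next_col < ncol :
--             next = (next_row, next_col)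
--             if next not in visited:
--                 visited.append(next)
--                 # return coordinate of that point
--                 yield next
--                 # yield input[next_row][next_col]
--                 yield from traverse(input, next, visited)
-- ===== SOURCE B (Python) =====
-- def traverse(input:list, start:tuple, visited:list[tuple]):
--     '''Iterative DFS with an explicit stack of (node, direction-index) frames
--     instead of recursion; same clockwise order, same mutation of visited.'''
--     nrow, ncol = len(input), len(input[0])
--     moves = [(-1, 0), (0, 1), (1, 0), (0, -1)]
--     stack = [[start, 0]]
--     while stack:
--         frame = stack[-1]
--         (row, col), i = frame
--         if i == 4:
--             stack.pop()
--             continue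
--         frame[1] = i + 1
--         next_row, next_col = row + moves[i][0], col + moves[i][1]
--         if 0 <= next_row < nrow and 0 <= next_col < ncol:
--             next = (next_row, next_col)
--             if next not in visited:
--                 visited.append(next)
--                 yield next
--                 stack.append([next, 0])
-- ===== Notes on version B (the rewrite author's own statement) =====
-- stated objective: alternative
-- what changed: The recursive generator DFS is replaced by an iterative generator driven by an explicit stack of (node, direction-index) frames: the top frame is advanced to its next in-bounds unvisited neighbor, which is marked, yielded and pushed as a fresh frame, and exhausted frames are popped; Pre_ only excludes the empty grid, on which both raise IndexError at input[0].
import Mathlib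
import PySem

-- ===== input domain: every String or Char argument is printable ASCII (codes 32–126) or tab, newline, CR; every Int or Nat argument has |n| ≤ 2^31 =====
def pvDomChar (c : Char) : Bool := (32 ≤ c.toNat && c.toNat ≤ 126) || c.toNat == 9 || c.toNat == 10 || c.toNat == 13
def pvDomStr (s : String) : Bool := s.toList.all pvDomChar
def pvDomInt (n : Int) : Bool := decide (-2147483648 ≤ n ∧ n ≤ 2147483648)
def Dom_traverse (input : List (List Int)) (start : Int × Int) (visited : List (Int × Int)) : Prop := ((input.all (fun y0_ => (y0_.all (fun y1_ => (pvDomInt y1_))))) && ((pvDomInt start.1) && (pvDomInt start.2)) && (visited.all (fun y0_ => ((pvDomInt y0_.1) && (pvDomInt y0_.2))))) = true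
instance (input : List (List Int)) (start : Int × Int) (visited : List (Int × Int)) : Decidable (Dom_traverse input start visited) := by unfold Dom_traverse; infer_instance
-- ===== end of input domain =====

-- B replaces A's recursive generator DFS by an iterative one driven by an explicit
-- stack of (node, direction-index) frames; same yields, same mutation of `visited`
-- (equivalence proved about the RETURN value, i.e. the list of yields; both mutate
-- `visited` identically in Python).

-- the four clockwise moves, shared literal of both Pythons
def pvDirs : List (Int × Int) := [(-1, 0), (0, 1), (1, 0), (0, -1)]

-- in-bounds grid cells (termination measure support, used by both ports' decreasing_by)
def pvCells (nrow ncol : Nat) : List (Int × Int) :=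
  (List.range nrow).flatMap (fun (r : Nat) => (List.range ncol).map (fun (c : Nat) => ((r : Int), (c : Int))))

def pvFresh (nrow ncol : Nat) (vis : List (Int × Int)) : Nat :=
  (pvCells nrow ncol).countP (fun q => ! vis.contains q)

theorem pvCountP_lt {α : Type} (l : List α) (p q : α → Bool)
    (himp : ∀ a ∈ l, p a = true → q a = true) (x : α) (hx : x ∈ l)
    (hqx : q x = true) (hpx : p x = false) : l.countP p < l.countP q := by
  induction l with
  | nil => cases hx
  | cons a l ih =>
    rcases List.mem_cons.mp hx with rfl | hx
    · have : l.countP p ≤ l.countP q := by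
        apply List.countP_mono_left
        intro a ha; exact himp a (List.mem_cons_of_mem _ ha)
      simp [hpx, hqx]; omega
    · have h := ih (fun a ha hp => himp a (List.mem_cons_of_mem _ ha) hp) hx
      simp only [List.countP_cons]
      by_cases hpa : p a = true
      · have hqa := himp a List.mem_cons_self hpa
        simp [hpa, hqa]; omega
      · simp only [Bool.not_eq_true] at hpa
        simp [hpa]; split <;> omega

theorem pvFresh_append_le (nrow ncol : Nat) (vis ext : List (Int × Int)) :
    pvFresh nrow ncol (vis ++ ext) ≤ pvFresh nrow ncol vis := by
  unfold pvFresh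
  apply List.countP_mono_left
  intro a _ h
  simp only [Bool.not_eq_true', List.contains_eq_mem, decide_eq_false_iff_not,
    List.mem_append, not_or] at h ⊢
  exact h.1

theorem pvMem_cells (nrow ncol : Nat) (r c : Int)
    (h0 : 0 ≤ r) (h1 : r < (nrow : Int)) (h2 : 0 ≤ c) (h3 : c < (ncol : Int)) :
    (r, c) ∈ pvCells nrow ncol := by
  unfold pvCells
  rw [List.mem_flatMap]
  refine ⟨r.toNat, List.mem_range.mpr (by omega), ?_⟩
  rw [List.mem_map]
  refine ⟨c.toNat, List.mem_range.mpr (by omega), ?_⟩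
  simp [Int.toNat_of_nonneg h0, Int.toNat_of_nonneg h2]

theorem pvFresh_append_fresh (nrow ncol : Nat) (vis : List (Int × Int)) (r c : Int)
    (h0 : 0 ≤ r) (h1 : r < (nrow : Int)) (h2 : 0 ≤ c) (h3 : c < (ncol : Int))
    (hv : (r, c) ∉ vis) :
    pvFresh nrow ncol (vis ++ [(r, c)]) < pvFresh nrow ncol vis := by
  unfold pvFresh
  refine pvCountP_lt (pvCells nrow ncol) _ _ ?_ ((r, c))
    (pvMem_cells nrow ncol r c h0 h1 h2 h3) ?_ ?_
  · intro a _ h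
    simp only [Bool.not_eq_true', List.contains_eq_mem, decide_eq_false_iff_not,
      List.mem_append, not_or] at h ⊢
    exact h.1
  · simp [hv]
  · simp

theorem pvMeasure_helper (nrow ncol : Nat) (vis : List (Int × Int)) (q : Int × Int)
    (ext : List (Int × Int)) (h : pvFresh nrow ncol (vis ++ [q]) < pvFresh nrow ncol vis)
    (k : Nat) :
    5 * pvFresh nrow ncol (vis ++ [q] ++ ext) + k < 5 * pvFresh nrow ncol vis + (k + 1) := by
  have h2 := pvFresh_append_le nrow ncol (vis ++ [q]) ext
  omega

-- ===== PORT A =====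
-- A's recursion: for each remaining move of the for-loop, step, and on a fresh
-- in-bounds neighbor append it to visited, yield it and recurse (fresh loop = pvDirs).
def pvGoA (nrow ncol : Nat) (p : Int × Int) (ms : List (Int × Int))
    (vis : List (Int × Int)) : List (Int × Int) :=
  match ms with
  | [] => []
  | m :: ms' =>
    let nr := p.1 + m.1
    let nc := p.2 + m.2
    if hb : 0 ≤ nr ∧ nr < (nrow : Int) ∧ 0 ≤ nc ∧ nc < (ncol : Int) then
      if hv : (nr, nc) ∈ vis then
        pvGoA nrow ncol p ms' vis
      else
        let ys := pvGoA nrow ncol (nr, nc) pvDirs (vis ++ [(nr, nc)])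
        (nr, nc) :: (ys ++ pvGoA nrow ncol p ms' (vis ++ [(nr, nc)] ++ ys))
    else
      pvGoA nrow ncol p ms' vis
termination_by 5 * pvFresh nrow ncol vis + ms.length
decreasing_by
  · simp only [List.length_cons]; omega
  · have := pvFresh_append_fresh nrow ncol vis (p.1 + m.1) (p.2 + m.2)
      hb.1 hb.2.1 hb.2.2.1 hb.2.2.2 hv
    simp only [pvDirs, List.length_cons, List.length_nil]; omega
  · simp only [List.length_cons]
    exact pvMeasure_helper nrow ncol vis _ _
      (pvFresh_append_fresh nrow ncol vis (p.1 + m.1) (p.2 + m.2)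
        hb.1 hb.2.1 hb.2.2.1 hb.2.2.2 hv) ms'.length
  · simp only [List.length_cons]; omega

def traverse (input : List (List Int)) (start : Int × Int) (visited : List (Int × Int)) : List (Int × Int) :=
  let nrow := input.length
  let ncol := (input.headD []).length  -- input[0]: exact since Pre_ gives input ≠ []
  pvGoA nrow ncol start pvDirs visited

-- ===== PORT B =====
-- B's loop: a stack of (node, next-direction-index) frames; advance the top frame,
-- push fresh neighbors, pop exhausted frames; out accumulates the yields.
def pvMach (nrow ncol : Nat) (stack : List ((Int × Int) × Nat))
    (vis out : List (Int × Int)) : List (Int × Int) :=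
  match stack with
  | [] => out
  | (p, i) :: rest =>
    if hi : i < 4 then
      let m := pvDirs.getD i (0, 0)
      let nr := p.1 + m.1
      let nc := p.2 + m.2
      if hb : 0 ≤ nr ∧ nr < (nrow : Int) ∧ 0 ≤ nc ∧ nc < (ncol : Int) then
        if hv : (nr, nc) ∈ vis then
          pvMach nrow ncol ((p, i + 1) :: rest) vis out
        else
          pvMach nrow ncol (((nr, nc), 0) :: (p, i + 1) :: rest)
            (vis ++ [(nr, nc)]) (out ++ [(nr, nc)])
      else
        pvMach nrow ncol ((p, i + 1) :: rest) vis out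
    else
      pvMach nrow ncol rest vis out
termination_by 5 * pvFresh nrow ncol vis + (stack.map (fun f => 4 - f.2)).sum + stack.length
decreasing_by
  · simp only [List.map_cons, List.sum_cons, List.length_cons]; omega
  · have := pvFresh_append_fresh nrow ncol vis (p.1 + (pvDirs.getD i (0, 0)).1)
      (p.2 + (pvDirs.getD i (0, 0)).2) hb.1 hb.2.1 hb.2.2.1 hb.2.2.2 hv
    simp only [List.map_cons, List.sum_cons, List.length_cons]; omega
  · simp only [List.map_cons, List.sum_cons, List.length_cons]; omega
  · simp only [List.map_cons, List.sum_cons, List.length_cons]; omega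

def traverse_alt (input : List (List Int)) (start : Int × Int) (visited : List (Int × Int)) : List (Int × Int) :=
  let nrow := input.length
  let ncol := (input.headD []).length
  pvMach nrow ncol [(start, 0)] visited []

-- ===== PRECONDITION & SPEC =====
-- Pre_ excludes only the empty grid, on which A's `len(input[0])` raises IndexError.
def Pre_traverse (input : List (List Int)) (start : Int × Int) (visited : List (Int × Int)) : Prop :=
  input ≠ []
instance (input : List (List Int)) (start : Int × Int) (visited : List (Int × Int)) : Decidable (Pre_traverse input start visited) := by unfold Pre_traverse; infer_instance

def pvWitness_traverse : List (List Int) × (Int × Int) × (List (Int × Int)) :=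
  ([[0, 0], [0, 0]], (0, 0), [])

def Spec_traverse (input : List (List Int)) (start : Int × Int) (visited : List (Int × Int)) (out : List (Int × Int)) : Prop := out = traverse_alt input start visited
instance (input : List (List Int)) (start : Int × Int) (visited : List (Int × Int)) (out : List (Int × Int)) : Decidable (Spec_traverse input start visited out) := by unfold Spec_traverse; infer_instance

-- ===== CLAIM (what is proved, stated in full; the proofs are below) =====
def Claim_equal_traverse : Prop := ∀ (input : List (List Int)) (start : Int × Int) (visited : List (Int × Int)), Dom_traverse input start visited → Pre_traverse input start visited → Spec_traverse input start visited (traverse input start visited)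

-- ===== LEMMAS AND PROOFS =====

-- running the machine on a frame (p, i) processes exactly what A's loop does for
-- the remaining moves pvDirs.drop i, appending A's yields to both vis and out
theorem pvMach_goA (nrow ncol : Nat) : ∀ (n : Nat) (p : Int × Int) (i : Nat)
    (vis rest out : _), 5 * pvFresh nrow ncol vis + (4 - i) ≤ n →
    pvMach nrow ncol ((p, i) :: rest) vis out =
      pvMach nrow ncol rest (vis ++ pvGoA nrow ncol p (pvDirs.drop i) vis)
        (out ++ pvGoA nrow ncol p (pvDirs.drop i) vis) := by
  intro n
  induction n with
  | zero =>
    intro p i vis rest out hle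
    have hi : ¬ i < 4 := by omega
    have hdrop : pvDirs.drop i = [] := List.drop_eq_nil_of_le (by simp [pvDirs]; omega)
    rw [pvMach, dif_neg hi, hdrop]
    simp [pvGoA]
  | succ n ih =>
    intro p i vis rest out hle
    by_cases hi : i < 4
    · have hlen : i < pvDirs.length := by simp [pvDirs]; omega
      have hdrop : pvDirs.drop i = pvDirs[i] :: pvDirs.drop (i + 1) :=
        List.drop_eq_getElem_cons hlen
      have hgd : pvDirs.getD i (0, 0) = pvDirs[i] := List.getD_eq_getElem pvDirs (0, 0) hlen
      rw [pvMach, dif_pos hi, hgd, hdrop, pvGoA]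
      by_cases hb : 0 ≤ p.1 + pvDirs[i].1 ∧ p.1 + pvDirs[i].1 < (nrow : Int) ∧
          0 ≤ p.2 + pvDirs[i].2 ∧ p.2 + pvDirs[i].2 < (ncol : Int)
      · rw [dif_pos hb, dif_pos hb]
        by_cases hv : (p.1 + pvDirs[i].1, p.2 + pvDirs[i].2) ∈ vis
        · rw [dif_pos hv, dif_pos hv]
          exact ih p (i + 1) vis rest out (by omega)
        · rw [dif_neg hv, dif_neg hv]
          have hfr := pvFresh_append_fresh nrow ncol vis _ _
            hb.1 hb.2.1 hb.2.2.1 hb.2.2.2 hv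
          have hle2 := pvFresh_append_le nrow ncol
            (vis ++ [(p.1 + pvDirs[i].1, p.2 + pvDirs[i].2)])
            (pvGoA nrow ncol (p.1 + pvDirs[i].1, p.2 + pvDirs[i].2) pvDirs
              (vis ++ [(p.1 + pvDirs[i].1, p.2 + pvDirs[i].2)]))
          rw [ih _ 0 _ _ _ (by omega)]
          rw [List.drop_zero]
          rw [ih p (i + 1) _ rest _ (by simp only [List.append_assoc] at hle2 ⊢; omega)]
          simp [List.append_assoc]
      · rw [dif_neg hb, dif_neg hb]
        exact ih p (i + 1) vis rest out (by omega)
    · have hdrop : pvDirs.drop i = [] := List.drop_eq_nil_of_le (by simp [pvDirs]; omega)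
      rw [pvMach, dif_neg hi, hdrop]
      simp [pvGoA]

-- ===== VERDICT (by name: the statement is the Claim_ definition above) =====
theorem traverse_spec : Claim_equal_traverse := by
  intro input start visited _ _
  unfold Spec_traverse _root_.traverse traverse_alt
  rw [pvMach_goA _ _ (5 * pvFresh input.length (input.headD []).length visited + 4)
    start 0 visited [] [] (by omega)]
  simp [pvMach, pvDirs]
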